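-- pv_equiv track=rewrite | github.com/w1ndhunter/enviro | enviro/boards/weather.py | _circular_median_bin
-- ===== SOURCE A (Python) =====
-- def _circular_median_bin(bin_indices):
--   """Circular median on the 8-sector ring: minimizes sum of shortest arc distances in steps."""
--   if not bin_indices:
--     return 0
--   best_cost = None
--   best_ks = None
--   for k in range(8):
--     cost = 0
--     for i in bin_indices:
--       d = abs(i - k)
--       cost += min(d, 8 - d)
--     if best_cost is None or cost < best_cost:
--       best_cost = cost
--       best_ks = [k]
--     elif cost == best_cost:
--       best_ks.append(k)
--   return min(best_ks, key=lambda kb: (-bin_indices.count(kb), kb))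
-- ===== SOURCE B (Python) =====
-- def _circular_median_bin(bin_indices):
--   """Rolling-cost circular median: evaluate the arc-distance cost at sector 0 once,
--   then derive each successive sector's cost by a finite-difference update built from
--   three CDF (values <= t) queries; ties are tracked as in the original."""
--   if not bin_indices:
--     return 0
--   n = len(bin_indices)
--
--   def le(t):
--     """CDF query: how many values are <= t."""
--     return sum(1 for v in bin_indices if v <= t)
--
--   c = 0
--   for v in bin_indices:
--     d = abs(v)
--     c += d if d <= 4 else 8 - d
--   best_cost = c
--   ties = [0]
--   for k in range(7):
--     # cost(k+1) - cost(k) = n + 2*le(k) - 2*le(k+4) - 2*le(k-4)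
--     c += n + 2 * le(k) - 2 * le(k + 4) - 2 * le(k - 4)
--     if c < best_cost:
--       best_cost = c
--       ties = [k + 1]
--     elif c == best_cost:
--       ties.append(k + 1)
--   return min(ties, key=lambda kb: (le(kb - 1) - le(kb), kb))
-- ===== Notes on version B (the rewrite author's own statement) =====
-- stated objective: alternative
-- what changed: B replaces A's brute-force re-scoring of all 8 sectors (a full min-arc-distance pass per sector, plus list.count per tying sector) by a finite-difference scheme: it scores only sector 0 and derives each successive sector's cost from the previous one via the telescoping identity cost(k+1)-cost(k) = n + 2*le(k) - 2*le(k+4) - 2*le(k-4), where le(t) is a CDF query (how many values <= t), and breaks ties with le(kb-1)-le(kb) instead of list.count.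
import Mathlib
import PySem

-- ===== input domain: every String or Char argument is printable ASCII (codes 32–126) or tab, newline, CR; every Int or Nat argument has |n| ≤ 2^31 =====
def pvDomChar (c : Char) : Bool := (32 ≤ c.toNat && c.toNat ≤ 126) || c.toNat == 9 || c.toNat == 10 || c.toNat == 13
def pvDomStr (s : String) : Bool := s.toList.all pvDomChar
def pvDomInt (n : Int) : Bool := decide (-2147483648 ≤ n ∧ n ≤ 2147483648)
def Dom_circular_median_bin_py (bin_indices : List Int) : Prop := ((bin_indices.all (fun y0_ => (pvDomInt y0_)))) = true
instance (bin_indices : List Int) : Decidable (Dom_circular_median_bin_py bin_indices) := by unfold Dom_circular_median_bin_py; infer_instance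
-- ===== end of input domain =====

-- B replaces A's brute-force re-scoring of all 8 sectors by a finite-difference scheme:
-- it scores sector 0 once and derives each next sector's cost from the previous one
-- via CDF ("how many values <= t") queries; same return value, similar cost.

-- ===== PORT A =====
-- literal transliteration of A; the final Python min(...) can only see a nonempty best_ks
-- (range(8) is nonempty), so the .getD 0 default is unreachable.
def circular_median_bin_py (bin_indices : List Int) : Int :=
  if bin_indices = [] then 0
  else
    let st := (PySem.List.pyRange 0 8 1).foldl
      (fun (st : Option Int × List Int) (k : Int) =>
        let cost := bin_indices.foldl (fun c i => let d := |i - k|; c + min d (8 - d)) 0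
        match st.1 with
        | none => (some cost, [k])
        | some bc =>
          if cost < bc then (some cost, [k])
          else if cost = bc then (some bc, st.2 ++ [k])
          else st)
      (none, [])
    (PySem.List.min2? st.2 (fun kb => -((bin_indices.count kb : Int))) (fun kb => kb)).getD 0

-- ===== PORT B =====
-- the CDF query 'le(t)': how many values of the list are <= t (as Python's sum of a generator)
def pvLe (bin_indices : List Int) (t : Int) : Int :=
  bin_indices.foldl (fun a v => if v ≤ t then a + 1 else a) 0

def circular_median_bin_py_alt (bin_indices : List Int) : Int :=
  if bin_indices = [] then 0
  else
    let n : Int := bin_indices.length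
    let c0 := bin_indices.foldl (fun a v => let d := |v|; a + (if d ≤ 4 then d else 8 - d)) 0
    let st := (PySem.List.pyRange 0 7 1).foldl
      (fun (st : Int × Int × List Int) (k : Int) =>
        let c := st.1 + n + 2 * pvLe bin_indices k - 2 * pvLe bin_indices (k + 4)
                   - 2 * pvLe bin_indices (k - 4)
        if c < st.2.1 then (c, c, [k + 1])
        else if c = st.2.1 then (c, st.2.1, st.2.2 ++ [k + 1])
        else (c, st.2.1, st.2.2))
      (c0, c0, [0])
    (PySem.List.min2? st.2.2 (fun kb => pvLe bin_indices (kb - 1) - pvLe bin_indices kb)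
      (fun kb => kb)).getD 0

-- ===== PRECONDITION & SPEC =====
def Spec_circular_median_bin_py (bin_indices : List Int) (out : Int) : Prop := out = circular_median_bin_py_alt bin_indices
instance (bin_indices : List Int) (out : Int) : Decidable (Spec_circular_median_bin_py bin_indices out) := by unfold Spec_circular_median_bin_py; infer_instance

-- ===== CLAIM (what is proved, stated in full; the proofs are below) =====
def Claim_equal_circular_median_bin_py : Prop := ∀ (bin_indices : List Int), Dom_circular_median_bin_py bin_indices → Spec_circular_median_bin_py bin_indices (circular_median_bin_py bin_indices)

-- ===== LEMMAS AND PROOFS =====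

-- the running-min/ties loop of A computes (min, filter of equal-cost ks)
lemma pv_argmin_fold (f : Int → Int) (ks : List Int) :
    ∀ (pre : List Int) (bc : Int), (∀ p ∈ pre, bc ≤ f p) →
    ks.foldl
      (fun (st : Option Int × List Int) (k : Int) =>
        match st.1 with
        | none => (some (f k), [k])
        | some b =>
          if f k < b then (some (f k), [k])
          else if f k = b then (some b, st.2 ++ [k])
          else st)
      (some bc, pre.filter (fun p => f p = bc)) =
      (some (ks.foldl (fun a k => min a (f k)) bc),
       (pre ++ ks).filter (fun p => f p = ks.foldl (fun a k => min a (f k)) bc)) := by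
  induction ks with
  | nil => intro pre bc _; rw [List.foldl_nil, List.foldl_nil, List.append_nil]
  | cons k t ih =>
    intro pre bc hpre
    simp only [List.foldl_cons]
    by_cases hlt : f k < bc
    · have h1 : min bc (f k) = f k := by omega
      have h2 : [k] = (pre ++ [k]).filter (fun p => f p = f k) := by
        rw [List.filter_append]
        have : pre.filter (fun p => f p = f k) = [] := by
          rw [List.filter_eq_nil_iff]
          intro p hp hfp
          have := hpre p hp
          simp at hfp
          omega
        simp [this]
      have := ih (pre ++ [k]) (f k)
        (by intro p hp
            rcases List.mem_append.mp hp with h | h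
            · have := hpre p h; omega
            · rw [List.mem_singleton] at h; subst h; omega)
      simp only [if_pos hlt, h1]
      rw [h2, this, List.append_assoc]
      rfl
    · by_cases heq : f k = bc
      · have h1 : min bc (f k) = bc := by omega
        have h2 : pre.filter (fun p => f p = bc) ++ [k] = (pre ++ [k]).filter (fun p => f p = bc) := by
          rw [List.filter_append]; simp [heq]
        have := ih (pre ++ [k]) bc
          (by intro p hp
              rcases List.mem_append.mp hp with h | h
              · exact hpre p h
              · rw [List.mem_singleton] at h; subst h; omega)
        simp only [if_neg hlt, if_pos heq, h1]
        rw [h2, this, List.append_assoc]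
        rfl
      · have h1 : min bc (f k) = bc := by omega
        have h2 : pre.filter (fun p => f p = bc) = (pre ++ [k]).filter (fun p => f p = bc) := by
          rw [List.filter_append]; simp [heq]
        have := ih (pre ++ [k]) bc
          (by intro p hp
              rcases List.mem_append.mp hp with h | h
              · exact hpre p h
              · rw [List.mem_singleton] at h; subst h; omega)
        simp only [if_neg hlt, if_neg heq, h1]
        rw [h2, this, List.append_assoc]
        rfl

-- A's cost of sector 0 equals B's first pass
lemma pv_c0 (xs : List Int) :
    xs.foldl (fun a v => let d := |v|; a + (if d ≤ 4 then d else 8 - d)) 0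
      = xs.foldl (fun c i => let d := |i - 0|; c + min d (8 - d)) 0 := by
  apply PySem.List.foldl_congr_mem
  intro a v _
  simp only [sub_zero]
  rcases abs_cases v with ⟨h, _⟩ | ⟨h, _⟩ <;> omega

-- pointwise/summed form of the finite-difference identity
lemma pv_sum_delta (k : Int) : ∀ (xs : List Int),
    (xs.map (fun i => min |i - (k + 1)| (8 - |i - (k + 1)|))).sum
      = (xs.map (fun i => min |i - k| (8 - |i - k|))).sum + (xs.length : Int)
        + 2 * (xs.map (fun v => if v ≤ k then (1 : Int) else 0)).sum
        - 2 * (xs.map (fun v => if v ≤ k + 4 then (1 : Int) else 0)).sum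
        - 2 * (xs.map (fun v => if v ≤ k - 4 then (1 : Int) else 0)).sum := by
  intro xs
  induction xs with
  | nil => simp
  | cons i t ih =>
    simp only [List.map_cons, List.sum_cons, List.length_cons]
    push_cast
    rcases abs_cases (i - (k + 1)) with ⟨e1, _⟩ | ⟨e1, _⟩ <;>
      rcases abs_cases (i - k) with ⟨e2, _⟩ | ⟨e2, _⟩ <;>
        rw [e1, e2] <;> split_ifs <;> omega

-- the CDF query as a 0/1 sum
lemma pv_le_sum (xs : List Int) (t : Int) :
    pvLe xs t = (xs.map (fun v => if v ≤ t then (1 : Int) else 0)).sum := by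
  unfold pvLe
  rw [PySem.List.foldl_congr_mem xs _ (fun (a : Int) (v : Int) => a + (if v ≤ t then (1 : Int) else 0)) 0
    (by intro a v _ ; by_cases h : v ≤ t <;> simp [h])]
  rw [PySem.List.foldl_add]
  omega

-- the finite-difference identity: cost(k+1) = cost(k) + n + 2*le(k) - 2*le(k+4) - 2*le(k-4)
lemma pv_delta (xs : List Int) (k : Int) :
    xs.foldl (fun c i => c + min |i - (k + 1)| (8 - |i - (k + 1)|)) 0
      = xs.foldl (fun c i => c + min |i - k| (8 - |i - k|)) 0
        + (xs.length : Int) + 2 * pvLe xs k - 2 * pvLe xs (k + 4) - 2 * pvLe xs (k - 4) := by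
  have h1 : xs.foldl (fun c i => c + min |i - (k + 1)| (8 - |i - (k + 1)|)) 0
      = (xs.map (fun i => min |i - (k + 1)| (8 - |i - (k + 1)|))).sum := by
    rw [PySem.List.foldl_add xs (fun i => min |i - (k + 1)| (8 - |i - (k + 1)|)) 0]
    omega
  have h2 : xs.foldl (fun c i => c + min |i - k| (8 - |i - k|)) 0
      = (xs.map (fun i => min |i - k| (8 - |i - k|))).sum := by
    rw [PySem.List.foldl_add xs (fun i => min |i - k| (8 - |i - k|)) 0]
    omega
  rw [h1, h2, pv_le_sum, pv_le_sum, pv_le_sum, pv_sum_delta k xs]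


-- B's rolling loop over range(j,7) computes (cost 7, running min, ties)
lemma pv_roll (f : Int → Int) (step :
    (Int × Int × List Int) → Int → (Int × Int × List Int))
    (hstep : step = fun st k =>
        if st.1 + (f (k + 1) - f k) < st.2.1 then
          (st.1 + (f (k + 1) - f k), st.1 + (f (k + 1) - f k), [k + 1])
        else if st.1 + (f (k + 1) - f k) = st.2.1 then
          (st.1 + (f (k + 1) - f k), st.2.1, st.2.2 ++ [k + 1])
        else (st.1 + (f (k + 1) - f k), st.2.1, st.2.2)) :
    ∀ (m : Nat) (j : Int), j + (m : Int) = 7 →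
    ∀ (pre : List Int) (b : Int), (∀ p ∈ pre, b ≤ f p) →
    (PySem.List.pyRange j 7 1).foldl step (f j, b, pre.filter (fun p => f p = b)) =
      (f 7,
       (PySem.List.pyRange j 7 1).foldl (fun a k => min a (f (k + 1))) b,
       (pre ++ (PySem.List.pyRange j 7 1).map (· + 1)).filter
         (fun p => f p = (PySem.List.pyRange j 7 1).foldl (fun a k => min a (f (k + 1))) b)) := by
  subst hstep
  intro m
  induction m with
  | zero =>
    intro j hj pre b _
    have hj7 : j = 7 := by omega
    subst hj7
    rw [PySem.List.pyRange_one_eq_nil (le_refl 7)]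
    simp only [List.foldl_nil, List.map_nil, List.append_nil]
    rfl
  | succ m ih =>
    intro j hj pre b hpre
    have hjlt : j < 7 := by omega
    rw [PySem.List.pyRange_one_cons hjlt]
    simp only [List.foldl_cons, List.map_cons]
    have hc : f j + (f (j + 1) - f j) = f (j + 1) := by ring
    simp only [hc]
    have hj' : j + 1 + (m : Int) = 7 := by push_cast at hj ⊢; omega
    by_cases hlt : f (j + 1) < b
    · have h2 : [j + 1] = (pre ++ [j + 1]).filter (fun p => f p = f (j + 1)) := by
        rw [List.filter_append]
        have : pre.filter (fun p => f p = f (j + 1)) = [] := by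
          rw [List.filter_eq_nil_iff]
          intro p hp hfp
          have := hpre p hp
          simp at hfp
          omega
        simp [this]
      have := ih (j + 1) hj' (pre ++ [j + 1]) (f (j + 1))
        (by intro p hp
            rcases List.mem_append.mp hp with h | h
            · have := hpre p h; omega
            · rw [List.mem_singleton] at h; subst h; omega)
      simp only [if_pos hlt]
      have hmin : min b (f (j + 1)) = f (j + 1) := by omega
      simp only [hmin]
      rw [h2, this, List.append_assoc]
      rfl
    · by_cases heq : f (j + 1) = b
      · have h2 : pre.filter (fun p => f p = b) ++ [j + 1]
            = (pre ++ [j + 1]).filter (fun p => f p = b) := by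
          rw [List.filter_append]; simp [heq]
        have := ih (j + 1) hj' (pre ++ [j + 1]) b
          (by intro p hp
              rcases List.mem_append.mp hp with h | h
              · exact hpre p h
              · rw [List.mem_singleton] at h; subst h; omega)
        simp only [if_neg hlt, if_pos heq]
        have hmin : min b (f (j + 1)) = b := by omega
        simp only [hmin]
        rw [h2, this, List.append_assoc]
        rfl
      · have h2 : pre.filter (fun p => f p = b) = (pre ++ [j + 1]).filter (fun p => f p = b) := by
          rw [List.filter_append]; simp [heq]
        have := ih (j + 1) hj' (pre ++ [j + 1]) b
          (by intro p hp
              rcases List.mem_append.mp hp with h | h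
              · exact hpre p h
              · rw [List.mem_singleton] at h; subst h; omega)
        simp only [if_neg hlt, if_neg heq]
        have hmin : min b (f (j + 1)) = b := by omega
        simp only [hmin]
        rw [h2, this, List.append_assoc]
        rfl


-- the tie-break keys agree: le(v-1) - le(v) = -(count of v)
lemma pv_key (xs : List Int) (v : Int) :
    pvLe xs (v - 1) - pvLe xs v = -((xs.count v : Int)) := by
  rw [pv_le_sum, pv_le_sum]
  induction xs with
  | nil => simp
  | cons i t ih =>
    simp only [List.map_cons, List.sum_cons, List.count_cons]
    by_cases h : i = v
    · subst h; simp only [BEq.rfl, if_pos]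
      push_cast
      split_ifs <;> omega
    · have hb : (i == v) = false := by simp [h]
      simp only [hb, Bool.false_eq_true, if_false]
      push_cast at ih ⊢
      split_ifs <;> omega

-- ===== VERDICT (by name: the statement is the Claim_ definition above) =====
theorem circular_median_bin_py_spec : Claim_equal_circular_median_bin_py := by
  intro xs _
  unfold Spec_circular_median_bin_py circular_median_bin_py circular_median_bin_py_alt
  by_cases hxs : xs = []
  · simp [hxs]
  · simp only [if_neg hxs]
    set f : Int → Int := fun k => xs.foldl (fun c i => let d := |i - k|; c + min d (8 - d)) 0 with hf
    have hfa : ∀ k : Int, List.foldl (fun c i => c + min |i - k| (8 - |i - k|)) 0 xs = f k :=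
      fun k => rfl
    simp only [hfa]
    -- name the candidate range, minimal cost and the set of tying sectors
    have hR : PySem.List.pyRange 0 8 1 = 0 :: PySem.List.pyRange 1 8 1 := by decide
    set T : List Int := PySem.List.pyRange 1 8 1 with hT
    set M : Int := T.foldl (fun a k => min a (f k)) (f 0) with hM
    -- A's running loop yields (some M, ties)
    have hA : (PySem.List.pyRange 0 8 1).foldl
        (fun (st : Option Int × List Int) (k : Int) =>
          match st.1 with
          | none => (some (f k), [k])
          | some bc =>
            if f k < bc then (some (f k), [k])
            else if f k = bc then (some bc, st.2 ++ [k])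
            else st)
        (none, []) = (some M, ([0] ++ T).filter (fun p => decide (f p = M))) := by
      have h1 := pv_argmin_fold f T [0] (f 0)
        (by intro p hp; rw [List.mem_singleton] at hp; subst hp; exact le_refl _)
      have h2 : List.filter (fun p => decide (f p = f 0)) [0] = [0] := by simp
      rw [h2] at h1
      rw [hR, List.foldl_cons]
      exact h1
    rw [hA]
    -- B's step: replace the finite-difference formula by f (k+1) - f k
    have hdelta : ∀ (s k : Int),
        s + (xs.length : Int) + 2 * pvLe xs k - 2 * pvLe xs (k + 4) - 2 * pvLe xs (k - 4)
          = s + (f (k + 1) - f k) := by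
      intro s k
      have hd := pv_delta xs k
      simp only [hf]
      omega
    simp only [hdelta]
    -- B's starting cost is f 0
    have hc0 : List.foldl (fun a v => a + if |v| ≤ 4 then |v| else 8 - |v|) 0 xs = f 0 :=
      pv_c0 xs
    rw [hc0]
    -- B's rolling loop
    have hB := pv_roll f _ rfl 7 0 (by norm_num) [0] (f 0)
      (by intro p hp; rw [List.mem_singleton] at hp; subst hp; exact le_refl _)
    have h00 : ([0] : List Int).filter (fun p => decide (f p = f 0)) = [0] := by simp
    rw [h00] at hB
    rw [hB]
    -- the tie lists coincide
    have hmap : (PySem.List.pyRange 0 7 1).map (fun x => x + 1) = T := by rw [hT]; decide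
    have hB0 : (PySem.List.pyRange 0 7 1).foldl (fun a k => min a (f (k + 1))) (f 0) = M := by
      rw [hM, ← hmap, List.foldl_map]
    simp only [hmap, hB0]
    -- the tie-break keys agree pointwise
    have hkey : (fun kb : Int => pvLe xs (kb - 1) - pvLe xs kb)
        = (fun kb : Int => -((xs.count kb : Int))) := by
      funext kb
      exact pv_key xs kb
    rw [hkey]
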